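-- pv_equiv track=rewrite | github.com/afrenoy/RiBoSor | tunestopfs.py | frameshiftability
-- ===== SOURCE A (Python) =====
-- def frameshiftability(sequence):
--     """Measuring the susceptibility for frameshifts due to runs of repeated nucleotides"""
--     """The sequence is taken as a python string"""
--     n=2
--     nbrepeats=[0 for nucl in sequence]
--     for (i,nucl) in enumerate(sequence):
--         if (i==0):
--             nbrepeats[i]=1
--             continue
--         if (sequence[i-1]==sequence[i]):
--             nbrepeats[i]=nbrepeats[i-1]+1
--         else:
--             nbrepeats[i]=1
--     return nbrepeats
-- ===== SOURCE B (Python) =====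
-- def frameshiftability(sequence):
--     """Measuring the susceptibility for frameshifts due to runs of repeated nucleotides"""
--     result = []
--     i = 0
--     n = len(sequence)
--     while i < n:
--         j = i
--         while j < n and sequence[j] == sequence[i]:
--             j += 1
--         result.extend(range(1, j - i + 1))
--         i = j
--     return result
-- ===== Notes on version B (the rewrite author's own statement) =====
-- stated objective: alternative
-- what changed: Replaces the element-wise back-reference loop over a preallocated counter array with a run-detection scan: find each maximal run of equal consecutive characters and emit 1..run_length for it.
import Mathlib
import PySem

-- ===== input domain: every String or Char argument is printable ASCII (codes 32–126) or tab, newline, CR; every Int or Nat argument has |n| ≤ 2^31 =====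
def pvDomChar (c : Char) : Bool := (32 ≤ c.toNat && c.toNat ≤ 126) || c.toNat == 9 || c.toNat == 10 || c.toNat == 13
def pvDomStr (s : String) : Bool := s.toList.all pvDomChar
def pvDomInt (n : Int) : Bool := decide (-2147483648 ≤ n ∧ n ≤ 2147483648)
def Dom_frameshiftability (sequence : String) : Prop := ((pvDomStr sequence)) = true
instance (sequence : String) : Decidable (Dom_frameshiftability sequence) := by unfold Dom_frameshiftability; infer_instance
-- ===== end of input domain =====

-- B replaces A's element-wise back-reference loop with a run-detection scan (find each
-- maximal run of equal consecutive characters, emit 1..run_length); objective: alternative.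

-- ===== PORT A =====
-- one loop step of A: "for (i,nucl) in enumerate(sequence): ..." writing nbrepeats[i]
def fsStepA (chars : List Char) (nb : List Int) (p : Int × Char) : List Int :=
  if p.1 = 0 then nb.set 0 1
  else if PySem.List.pyGetD chars (p.1 - 1) ' ' = p.2 then
    nb.set p.1.toNat (PySem.List.pyGetD nb (p.1 - 1) 0 + 1)
  else
    nb.set p.1.toNat 1

def frameshiftability (sequence : String) : List Int :=
  let chars := sequence.toList
  let nbrepeats : List Int := chars.map (fun _ => 0)
  List.foldl (fsStepA chars) nbrepeats (PySem.List.enumerate chars)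

-- ===== PORT B =====
-- outer while loop of B: take the maximal run starting at the current position,
-- emit 1..run_length (the inner scan is the takeWhile/dropWhile split), continue after it
def fsRuns : List Char → List Int
  | [] => []
  | c :: cs =>
    (List.range ((cs.takeWhile (fun d => d = c)).length + 1)).map (fun (j : Nat) => (j : Int) + 1)
      ++ fsRuns (cs.dropWhile (fun d => d = c))
termination_by l => l.length
decreasing_by
  simp only [List.length_cons]
  exact Nat.lt_succ_of_le (List.length_dropWhile_le _ _)

def frameshiftability_alt (sequence : String) : List Int :=
  fsRuns sequence.toList

-- ===== PRECONDITION & SPEC =====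
def Spec_frameshiftability (sequence : String) (out : List Int) : Prop := out = frameshiftability_alt sequence
instance (sequence : String) (out : List Int) : Decidable (Spec_frameshiftability sequence out) := by unfold Spec_frameshiftability; infer_instance

-- ===== CLAIM (what is proved, stated in full; the proofs are below) =====
def Claim_equal_frameshiftability : Prop := ∀ (sequence : String), Dom_frameshiftability sequence → Spec_frameshiftability sequence (frameshiftability sequence)

-- ===== LEMMAS AND PROOFS =====

-- the common reference: the forward scan carrying (previous char, current count)
def fsGo (prev : Char) (k : Int) : List Char → List Int
  | [] => []
  | c :: cs => let k' := if c = prev then k + 1 else 1; k' :: fsGo c k' cs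

def fsRl : List Char → List Int
  | [] => []
  | c :: cs => 1 :: fsGo c 1 cs

theorem fsGo_length (prev : Char) (k : Int) (l : List Char) : (fsGo prev k l).length = l.length := by
  induction l generalizing prev k with
  | nil => rfl
  | cons c cs ih => simp [fsGo, ih]

theorem fsRl_length (l : List Char) : (fsRl l).length = l.length := by
  cases l with
  | nil => rfl
  | cons c cs => simp [fsRl, fsGo_length]


-- B-side: fsGo over a run of m copies of c followed by a non-c remainder
theorem fsGo_replicate (m : Nat) (c : Char) (k : Int) (rest : List Char)
    (h : ∀ d, rest.head? = some d → d ≠ c) :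
    fsGo c k (List.replicate m c ++ rest)
      = (List.range m).map (fun (j : Nat) => k + (j : Int) + 1) ++ fsRl rest := by
  induction m generalizing k with
  | zero =>
    cases rest with
    | nil => rfl
    | cons d ds =>
      have hd : d ≠ c := h d rfl
      simp [fsGo, fsRl, hd]
  | succ m ih =>
    have hstep : fsGo c k (List.replicate (m+1) c ++ rest)
        = (k+1) :: fsGo c (k+1) (List.replicate m c ++ rest) := by
      simp [List.replicate_succ, fsGo]
    rw [hstep, ih (k+1), List.range_succ_eq_map]
    simp only [List.map_cons, List.map_map, List.cons_append]
    congr 1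
    · norm_num
    · congr 1
      apply List.map_congr_left
      intro j _
      simp only [Function.comp_apply]
      push_cast
      ring

theorem fsRuns_eq_fsRl (l : List Char) : fsRuns l = fsRl l := by
  induction l using fsRuns.induct with
  | case1 => rw [fsRuns, fsRl]
  | case2 c cs ih =>
    rw [fsRuns, ih]
    have htw : cs.takeWhile (fun d => d = c)
        = List.replicate ((cs.takeWhile (fun d => d = c)).length) c := by
      apply List.eq_replicate_of_mem
      intro d hd
      exact of_decide_eq_true (List.mem_takeWhile_imp (p := fun d => decide (d = c)) hd)
    have hhd : ∀ d, (cs.dropWhile (fun d => d = c)).head? = some d → d ≠ c := by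
      intro d hd
      have := List.head?_dropWhile_not (fun d => decide (d = c)) cs
      rw [hd] at this
      simpa using this
    have hcs : cs = List.replicate ((cs.takeWhile (fun d => d = c)).length) c
        ++ cs.dropWhile (fun d => d = c) := by
      conv_lhs => rw [← List.takeWhile_append_dropWhile (p := fun d => decide (d = c)) (l := cs)]
      rw [← htw]
    show _ = fsRl (c :: cs)
    rw [fsRl]
    conv_rhs => rw [hcs]
    rw [fsGo_replicate _ _ _ _ hhd, List.range_succ_eq_map]
    simp only [List.map_cons, List.map_map, List.cons_append]
    congr 1
    congr 1
    apply List.map_congr_left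
    intro j _
    simp only [Function.comp_apply]
    push_cast
    ring

-- pointwise step characterisation of fsRl (what A's loop body computes at index i+1)
theorem fsRl_step (c : Char) (cs : List Char) (k : Int) (i : Nat) (hi : i + 1 < (c :: cs).length) :
    (k :: fsGo c k cs).getD (i+1) 0
      = if (c :: cs).getD i ' ' = (c :: cs).getD (i+1) ' '
        then (k :: fsGo c k cs).getD i 0 + 1 else 1 := by
  induction cs generalizing c k i with
  | nil => simp at hi
  | cons d ds ih =>
    cases i with
    | zero =>
      by_cases hcd : c = d
      · simp [fsGo, hcd]
      · have : ¬ d = c := fun h => hcd h.symm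
        simp [fsGo, hcd, this]
    | succ j =>
      have hj : j + 1 < (d :: ds).length := by simpa using hi
      have := ih d (if d = c then k + 1 else 1) j hj
      simpa [fsGo, List.getD_cons_succ] using this

theorem fsRl_head (c : Char) (cs : List Char) : (fsRl (c :: cs)).getD 0 0 = 1 := by
  rw [fsRl]; rfl


-- setting index k in the invariant state extends the verified prefix by one
theorem fsSet_inv (R : List Int) (n k : Nat) (hR : R.length = n) (hk : k < n) (v : Int)
    (hv : v = R.getD k 0) :
    (R.take k ++ List.replicate (n - k) 0).set k v
      = R.take (k+1) ++ List.replicate (n - (k+1)) 0 := by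
  have hlen : (R.take k).length = k := by simp; omega
  rw [List.set_append, hlen, if_neg (lt_irrefl k), Nat.sub_self]
  have hrep : List.replicate (n - k) (0:Int) = 0 :: List.replicate (n - (k+1)) 0 := by
    have : n - k = (n - (k+1)) + 1 := by omega
    rw [this, List.replicate_succ]
  rw [hrep, List.set_cons_zero, List.take_add_one]
  have hget : R[k]? = some v := by
    rw [List.getElem?_eq_getElem (by omega)]
    rw [hv, List.getD_eq_getElem?_getD, List.getElem?_eq_getElem (by omega)]
    rfl
  simp [hget]

-- reading index j < k from the invariant state reads R
theorem fsGetD_inv (R : List Int) (n k j : Nat) (hR : R.length = n) (hkn : k ≤ n) (hj : j < k) :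
    (R.take k ++ List.replicate (n - k) 0).getD j 0 = R.getD j 0 := by
  have hlen : (R.take k).length = k := by simp; omega
  rw [List.getD_append _ _ _ _ (by omega)]
  rw [List.getD_eq_getElem?_getD, List.getElem?_take, if_pos hj, ← List.getD_eq_getElem?_getD]

-- A-side: the foldl over the enumerated suffix, with the invariant state
theorem fsFoldA (chars : List Char) (suf : List Char) (k : Nat)
    (hdrop : chars.drop k = suf) (hk : k + suf.length = chars.length) :
    List.foldl (fsStepA chars) ((fsRl chars).take k ++ List.replicate (chars.length - k) 0)
      (PySem.List.enumerate suf (k : Int)) = fsRl chars := by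
  induction suf generalizing k with
  | nil =>
    have hkn : k = chars.length := by simpa using hk
    subst hkn
    simp [PySem.List.enumerate, List.take_of_length_le (le_of_eq (fsRl_length chars))]
  | cons c suf' ih =>
    have hklt : k < chars.length := by simp at hk; omega
    have hck : chars[k]'hklt = c := by
      have : (chars.drop k)[0]'(by rw [hdrop]; simp) = c := by
        simp [hdrop]
      simpa using this
    have hdrop' : chars.drop (k+1) = suf' := by
      have : chars.drop (k+1) = (chars.drop k).drop 1 := by
        rw [List.drop_drop]
      rw [this, hdrop]; rfl
    have hk' : (k+1) + suf'.length = chars.length := by simp at hk ⊢; omega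
    rw [PySem.List.enumerate_cons, List.foldl_cons]
    have hval : fsStepA chars ((fsRl chars).take k ++ List.replicate (chars.length - k) 0) ((k : Int), c)
        = (fsRl chars).take (k+1) ++ List.replicate (chars.length - (k+1)) 0 := by
      have hRlen : (fsRl chars).length = chars.length := fsRl_length chars
      obtain ⟨c0, cs, hchars⟩ : ∃ c0 cs, chars = c0 :: cs := by
        cases chars with
        | nil => simp at hklt
        | cons a as => exact ⟨a, as, rfl⟩
      cases k with
      | zero =>
        have h1 : (1:Int) = (fsRl chars).getD 0 0 := by
          rw [hchars, fsRl_head]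
        simp only [fsStepA, Nat.cast_zero, if_pos]
        exact fsSet_inv _ _ _ hRlen hklt _ h1
      | succ j =>
        have hne : ((j+1 : Nat) : Int) ≠ 0 := by push_cast; omega
        have hcast1 : ((j+1 : Nat) : Int) - 1 = ((j : Nat) : Int) := by push_cast; ring
        have htn : ((j+1 : Nat) : Int).toNat = j + 1 := by simp
        have hjk : j < j + 1 := Nat.lt_succ_self j
        have hgetst : PySem.List.pyGetD ((fsRl chars).take (j+1) ++ List.replicate (chars.length - (j+1)) 0) (((j+1 : Nat) : Int) - 1) 0
            = (fsRl chars).getD j 0 := by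
          rw [hcast1, PySem.List.pyGetD_natCast]
          exact fsGetD_inv _ _ _ _ hRlen (le_of_lt hklt) hjk
        have hgetch : PySem.List.pyGetD chars (((j+1 : Nat) : Int) - 1) ' ' = chars.getD j ' ' := by
          rw [hcast1, PySem.List.pyGetD_natCast]
        have hckD : chars.getD (j+1) ' ' = c := by
          rw [List.getD_eq_getElem?_getD, List.getElem?_eq_getElem hklt, hck]
          rfl
        have hstepR : (fsRl chars).getD (j+1) 0
            = if chars.getD j ' ' = c then (fsRl chars).getD j 0 + 1 else 1 := by
          rw [hchars]
          rw [hchars] at hklt hckD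
          rw [fsRl] at *
          rw [fsRl_step c0 cs 1 j hklt, hckD]
        simp only [fsStepA]
        rw [if_neg hne, hgetst, hgetch, htn]
        by_cases hc : chars.getD j ' ' = c
        · rw [if_pos hc]
          refine fsSet_inv _ _ _ hRlen hklt _ ?_
          rw [hstepR, if_pos hc]
        · rw [if_neg hc]
          refine fsSet_inv _ _ _ hRlen hklt _ ?_
          rw [hstepR, if_neg hc]
    rw [hval]
    have : ((k : Int) + 1) = (((k+1 : Nat) : Int)) := by push_cast; ring
    rw [this]
    exact ih (k+1) hdrop' hk'

-- ===== VERDICT (by name: the statement is the Claim_ definition above) =====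
theorem frameshiftability_spec : Claim_equal_frameshiftability := by
  intro s _
  show frameshiftability s = frameshiftability_alt s
  rw [frameshiftability, frameshiftability_alt, fsRuns_eq_fsRl]
  have h0 : (s.toList.map (fun _ => (0:Int))) = List.replicate s.toList.length 0 := by
    simp
  have := fsFoldA s.toList s.toList 0 (by simp) (by simp)
  simpa [h0] using this
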